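-- pv_equiv track=rewrite | github.com/kevinxu9595/nmrl | adacth.py | generate_chi
-- ===== SOURCE A (Python) =====
-- def generate_chi(l, g):
--     chi = []
--     for k in range(1,l+1):
--         newg = []
--         for i in range(g**k):
--             somelists = tuple(i//g**(x-1) % g for x in range(k,0, -1))
--             newg.append(somelists)
--         chi.append(newg)
--     return chi
-- ===== SOURCE B (Python) =====
-- def generate_chi(l, g):
--     # Build each level incrementally from the previous one instead of
--     # re-deriving every digit of every index with pow/floordiv.
--     chi = []
--     level = [()]
--     for _ in range(l):
--         level = [prev + (d,) for prev in level for d in range(g)]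
--         chi.append(level)
--     return chi
-- ===== Notes on version B (the rewrite author's own statement) =====
-- stated objective: alternative
-- what changed: B builds each level incrementally by extending every tuple of the previous level with each digit in range(g), instead of indexing: A enumerates i in range(g**k) and recomputes all k digits of i with pow/floordiv/mod for every tuple.
-- intended difference: For negative base g with l >= 2, A's range(g**k) is non-empty for even k so A returns accidental non-empty levels of 'digits' of a negative base (e.g. [[],[(0,0)]] at (2,-1)), while B returns empty levels ([[],[]]), the intended value since there are no digits d with 0 <= d < g when g < 0. — e.g. on generate_chi(2, -1): A returns [[], [[0, 0]]], B returns [[], []]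
import Mathlib
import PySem

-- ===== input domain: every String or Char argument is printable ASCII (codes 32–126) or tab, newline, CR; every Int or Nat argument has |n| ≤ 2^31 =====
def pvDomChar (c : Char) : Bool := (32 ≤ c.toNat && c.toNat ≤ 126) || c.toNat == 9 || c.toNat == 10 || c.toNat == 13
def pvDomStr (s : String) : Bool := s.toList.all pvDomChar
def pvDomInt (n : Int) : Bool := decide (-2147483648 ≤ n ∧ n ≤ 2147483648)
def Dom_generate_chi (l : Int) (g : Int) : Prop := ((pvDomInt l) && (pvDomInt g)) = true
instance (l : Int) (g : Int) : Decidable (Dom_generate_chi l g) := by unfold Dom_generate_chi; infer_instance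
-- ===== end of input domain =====

-- B builds each level of base-g tuples incrementally from the previous level instead of
-- re-deriving every digit of every index i < g**k with pow/floordiv/mod (objective: alternative).

-- ===== PORT A =====
def generate_chi (l : Int) (g : Int) : List (List (List Int)) :=
  (PySem.List.pyRange 1 (l + 1) 1).foldl
    (fun chi k =>
      let newg := (PySem.List.pyRange 0 (g ^ k.toNat) 1).foldl
        (fun newg i =>
          let somelists := (PySem.List.pyRange k 0 (-1)).map
            (fun x => PySem.Int.mod (PySem.Int.floordiv i (g ^ (x - 1).toNat)) g)
          newg ++ [somelists]) []
      chi ++ [newg]) []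

-- ===== PORT B =====
def generate_chi_alt (l : Int) (g : Int) : List (List (List Int)) :=
  ((PySem.List.pyRange 0 l 1).foldl
    (fun st _ =>
      let level := st.2.flatMap
        (fun prev => (PySem.List.pyRange 0 g 1).map (fun d => prev ++ [d]))
      (st.1 ++ [level], level))
    (([] : List (List (List Int))), ([[]] : List (List Int)))).1

-- ===== PRECONDITION & SPEC =====
-- For negative base g with l ≥ 2, A's range(g**k) is non-empty for even k so A returns
-- accidental non-empty levels of "digits" of a negative base (e.g. [[],[(0,0)]] at (2,-1)),
-- while B returns empty levels ([[],[]]), the intended value since there are no digits d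
-- with 0 ≤ d < g when g < 0.
def D_generate_chi (l : Int) (g : Int) : Prop := 2 ≤ l ∧ g < 0
instance (l : Int) (g : Int) : Decidable (D_generate_chi l g) := by unfold D_generate_chi; infer_instance

def Spec_generate_chi (l : Int) (g : Int) (out : List (List (List Int))) : Prop :=
  ¬ D_generate_chi l g → out = generate_chi_alt l g
instance (l : Int) (g : Int) (out : List (List (List Int))) : Decidable (Spec_generate_chi l g out) := by unfold Spec_generate_chi; infer_instance

def pvDiffWitness_generate_chi : Int × Int := (2, -1)
def pvDiffWitnessOut_generate_chi : (List (List (List Int))) × (List (List (List Int))) :=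
  ([[], [[0, 0]]], [[], []])

-- ===== CLAIM (what is proved, stated in full; the proofs are below) =====
def Claim_unchanged_generate_chi : Prop := ∀ (l : Int) (g : Int), Dom_generate_chi l g → Spec_generate_chi l g (generate_chi l g)
def Claim_changed_generate_chi : Prop := Dom_generate_chi (pvDiffWitness_generate_chi.1) (pvDiffWitness_generate_chi.2) ∧ D_generate_chi (pvDiffWitness_generate_chi.1) (pvDiffWitness_generate_chi.2) ∧ generate_chi (pvDiffWitness_generate_chi.1) (pvDiffWitness_generate_chi.2) = pvDiffWitnessOut_generate_chi.1 ∧ generate_chi_alt (pvDiffWitness_generate_chi.1) (pvDiffWitness_generate_chi.2) = pvDiffWitnessOut_generate_chi.2 ∧ pvDiffWitnessOut_generate_chi.1 ≠ pvDiffWitnessOut_generate_chi.2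
def Claim_exact_generate_chi : Prop := ∀ (l : Int) (g : Int), Dom_generate_chi l g → D_generate_chi l g → generate_chi l g ≠ generate_chi_alt l g

-- ===== LEMMAS AND PROOFS =====

-- Proof-side Nat formulations of the two level constructions.

/-- A's level `k` for base `G`: the digits of every `i < G^k`, most significant first. -/
def levN (G k : Nat) : List (List Int) :=
  (List.range (G ^ k)).map (fun m => (List.range k).map
    (fun j => (((m / G ^ (k - 1 - j)) % G : Nat) : Int)))

/-- B's level `n` for base `G`, built incrementally. -/
def lvlN (G : Nat) : Nat → List (List Int)
  | 0 => [[]]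
  | n + 1 => (lvlN G n).flatMap (fun p => (List.range G).map (fun (d : Nat) => p ++ [(d : Int)]))

/-- B's level over Int base, exactly as the port builds it. -/
def lvlB (g : Int) : Nat → List (List Int)
  | 0 => [[]]
  | n + 1 => (lvlB g n).flatMap
      (fun prev => (PySem.List.pyRange 0 g 1).map (fun d => prev ++ [d]))

theorem range_mul_flatMap (a G : Nat) :
    List.range (a * G) = (List.range a).flatMap
      (fun q => (List.range G).map (fun r => q * G + r)) := by
  induction a with
  | zero => simp
  | succ a ih =>
      rw [Nat.succ_mul, List.range_add, ih, List.range_succ, List.flatMap_append]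
      simp

theorem digits_step (G k q r : Nat) (hr : r < G) :
    (List.range (k + 1)).map (fun j => ((((q * G + r) / G ^ (k - j)) % G : Nat) : Int))
      = (List.range k).map (fun j => (((q / G ^ (k - 1 - j)) % G : Nat) : Int)) ++ [(r : Int)] := by
  have hG : 0 < G := by omega
  rw [List.range_succ, List.map_append]
  congr 1
  · apply List.map_congr_left
    intro j hj
    simp only [List.mem_range] at hj
    have he : G ^ (k - j) = G * G ^ (k - 1 - j) := by
      have h : k - j = (k - 1 - j) + 1 := by omega
      rw [h, pow_succ']
    have hq : (q * G + r) / G = q := by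
      rw [Nat.add_comm, Nat.add_mul_div_right r q hG, Nat.div_eq_of_lt hr, Nat.zero_add]
    rw [he, ← Nat.div_div_eq_div_mul, hq]
  · have hmod : (q * G + r) % G = r := by
      rw [Nat.mul_comm q G, Nat.mul_add_mod, Nat.mod_eq_of_lt hr]
    simp only [List.map_cons, List.map_nil, Nat.sub_self, pow_zero, Nat.div_one, hmod]

theorem levN_eq_lvlN (G : Nat) : ∀ k, levN G k = lvlN G k := by
  intro k
  induction k with
  | zero => simp [levN, lvlN]
  | succ k ih =>
      unfold levN lvlN
      rw [← ih]
      unfold levN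
      rw [pow_succ, range_mul_flatMap, List.map_flatMap, List.flatMap_map]
      apply List.flatMap_congr
      intro q hq
      rw [List.map_map]
      apply List.map_congr_left
      intro r hr
      simp only [List.mem_range] at hr
      simp only [Function.comp_def, Nat.add_sub_cancel]
      exact digits_step G k q r hr

theorem lvlB_eq_lvlN (G : Nat) : ∀ n, lvlB ((G : Nat) : Int) n = lvlN G n := by
  intro n
  induction n with
  | zero => rfl
  | succ n ih =>
      show (lvlB _ n).flatMap _ = (lvlN G n).flatMap _
      rw [ih]
      apply List.flatMap_congr
      intro p hp
      simp only [PySem.List.pyRange_zero_natCast, List.map_map, Function.comp_def]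

theorem genA_eq (l g : Int) :
    generate_chi l g = (PySem.List.pyRange 1 (l + 1) 1).map (fun k =>
      (PySem.List.pyRange 0 (g ^ k.toNat) 1).map (fun i =>
        (PySem.List.pyRange k 0 (-1)).map (fun x =>
          PySem.Int.mod (PySem.Int.floordiv i (g ^ (x - 1).toNat)) g))) := by
  simp only [generate_chi, PySem.List.foldl_append_singleton_eq_map, List.nil_append]

theorem foldB (g : Int) (n : Nat) :
    (List.range n).foldl
      (fun (st : List (List (List Int)) × List (List Int)) (_ : Nat) =>
        (st.1 ++ [st.2.flatMap (fun prev => (PySem.List.pyRange 0 g 1).map (fun d => prev ++ [d]))],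
         st.2.flatMap (fun prev => (PySem.List.pyRange 0 g 1).map (fun d => prev ++ [d]))))
      ([], [[]])
    = ((List.range n).map (fun j => lvlB g (j + 1)), lvlB g n) := by
  induction n with
  | zero => rfl
  | succ n ih =>
      rw [List.range_succ, List.foldl_append, ih]
      simp [lvlB]

theorem genB_eq (l g : Int) :
    generate_chi_alt l g = (List.range l.toNat).map (fun j => lvlB g (j + 1)) := by
  unfold generate_chi_alt
  rw [PySem.List.pyRange_zero l, List.foldl_map]
  exact congrArg Prod.fst (foldB g l.toNat)

theorem levelA_cast (G j : Nat) :
    (PySem.List.pyRange 0 (((G : Nat) : Int) ^ ((1 : Int) + (j : Int)).toNat) 1).map (fun i =>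
      (PySem.List.pyRange ((1 : Int) + (j : Int)) 0 (-1)).map (fun x =>
        PySem.Int.mod (PySem.Int.floordiv i (((G : Nat) : Int) ^ (x - 1).toNat)) ((G : Nat) : Int)))
    = lvlN G (j + 1) := by
  have h1 : ((1 : Int) + (j : Int)).toNat = j + 1 := by omega
  have h2 : ((G : Nat) : Int) ^ (j + 1) = ((G ^ (j + 1) : Nat) : Int) := by push_cast; ring
  rw [h1, h2, PySem.List.pyRange_zero_natCast, List.map_map, ← levN_eq_lvlN]
  unfold levN
  apply List.map_congr_left
  intro m hm
  simp only [Function.comp]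
  rw [PySem.List.pyRange_neg_one]
  have h3 : ((1 : Int) + (j : Int) - 0).toNat = j + 1 := by omega
  rw [h3, List.map_map]
  apply List.map_congr_left
  intro t ht
  simp only [List.mem_range] at ht
  simp only [Function.comp]
  have h4 : ((1 : Int) + (j : Int) - (t : Int) - 1).toNat = j - t := by omega
  rw [h4]
  have h5 : ((G : Nat) : Int) ^ (j - t) = ((G ^ (j - t) : Nat) : Int) := by push_cast; ring
  rw [h5, PySem.Int.floordiv_natCast, PySem.Int.mod_natCast]
  simp

theorem main_nonneg (l g : Int) (hg : 0 ≤ g) : generate_chi l g = generate_chi_alt l g := by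
  rw [genA_eq, genB_eq, PySem.List.pyRange_one]
  have hl : l + 1 - 1 = l := by ring
  rw [hl, List.map_map]
  apply List.map_congr_left
  intro j hj
  simp only [Function.comp]
  obtain ⟨G, rfl⟩ : ∃ G : Nat, g = (G : Int) := ⟨g.toNat, (Int.toNat_of_nonneg hg).symm⟩
  rw [lvlB_eq_lvlN]
  exact levelA_cast G j

theorem main_neg_small (l g : Int) (hg : g < 0) (hl : l < 2) :
    generate_chi l g = generate_chi_alt l g := by
  rw [genA_eq, genB_eq]
  rcases (by omega : l ≤ 0 ∨ l = 1) with h | h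
  · rw [PySem.List.pyRange_one_eq_nil (by omega)]
    have h0 : l.toNat = 0 := by omega
    simp [h0]
  · subst h
    have hr2 : PySem.List.pyRange 1 (1 + 1) 1 = [1] := by decide
    have hempty : PySem.List.pyRange 0 g 1 = [] := PySem.List.pyRange_one_eq_nil (by omega)
    rw [hr2]
    simp [lvlB, hempty, pow_one]

theorem generate_chi_spec : Claim_unchanged_generate_chi := by
  intro l g _ hnd
  rcases lt_or_ge g 0 with hg | hg
  · have hl : l < 2 := by
      by_contra hl
      exact hnd ⟨by omega, hg⟩
    exact main_neg_small l g hg hl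
  · exact main_nonneg l g hg

theorem generate_chi_changed : Claim_changed_generate_chi := by
  unfold Claim_changed_generate_chi; decide

theorem generate_chi_tight : Claim_exact_generate_chi := by
  intro l g _ hd h
  obtain ⟨hl, hg⟩ := hd
  rw [genA_eq, genB_eq, PySem.List.pyRange_one] at h
  have hl1 : l + 1 - 1 = l := by ring
  rw [hl1, List.map_map] at h
  have h1 := congrArg (fun xs : List (List (List Int)) => xs[1]?) h
  have hlt : 1 < l.toNat := by omega
  simp only [List.getElem?_map, List.getElem?_range hlt, Function.comp, Option.map_some] at h1
  have hB : lvlB g (1 + 1) = [] := by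
    have hempty : PySem.List.pyRange 0 g 1 = [] := PySem.List.pyRange_one_eq_nil (by omega)
    simp [lvlB, hempty]
  rw [hB] at h1
  have h2 := Option.some.inj h1
  have hlen := congrArg List.length h2
  rw [List.length_map, PySem.List.length_pyRange_one, List.length_nil] at hlen
  have hpos : (0 : Int) < g ^ ((1 : Int) + ((1 : Nat) : Int)).toNat := by
    have ht : ((1 : Int) + ((1 : Nat) : Int)).toNat = 2 := by decide
    rw [ht, pow_two]
    exact mul_pos_of_neg_of_neg hg hg
  omega
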